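-- pv_equiv track=rewrite | github.com/alexandraback/datacollection | solutions_2749486_0/Python/MrMoe/B.py | getseq_
-- ===== SOURCE A (Python) =====
-- def getseq_(a, n):
--     seq = []
--     sum = 0
--     while sum <= (a-n):
--         seq.append(n)
--         sum += n
--         n += 1
--
--     if sum == a:
--         return seq, n
--
--     for i in range(a-sum):
--         seq.append(-n)
--         seq.append(n+1)
--         n += 2
--
--     return seq, n
-- ===== SOURCE B (Python) =====
-- def _isqrt(x):
--     # floor square root by binary digits (x >= 0, x < 2**128)
--     r = 0
--     k = 63
--     while k >= 0:
--         c = r + (1 << k)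
--         if c * c <= x:
--             r = c
--         k -= 1
--     return r
--
--
-- def getseq_(a, n):
--     # closed-form run length: m = least k >= 0 with n + (n+1) + ... + (n+k) > a
--     if n > a:
--         m = 0
--     else:
--         d = (2 * n - 1) ** 2 + 8 * a
--         m = (_isqrt(d) - (2 * n + 1)) // 2 + 1
--     seq = list(range(n, n + m))
--     s = m * n + m * (m - 1) // 2
--     n += m
--     if s == a:
--         return seq, n
--     r = a - s
--     if r > 0:
--         seq += [v for i in range(r) for v in (-(n + 2 * i), n + 2 * i + 1)]
--         n += 2 * r
--     return seq, n
-- ===== Notes on version B (the rewrite author's own statement) =====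
-- stated objective: alternative
-- what changed: The phase-1 run length is computed in closed form (solving m*n + m(m-1)/2 <= a with a hand-written bitwise integer square root) and the remainder pairs are produced by index arithmetic in one comprehension, instead of A's term-by-term scanning loop and stateful appending loop.
import Mathlib
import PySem

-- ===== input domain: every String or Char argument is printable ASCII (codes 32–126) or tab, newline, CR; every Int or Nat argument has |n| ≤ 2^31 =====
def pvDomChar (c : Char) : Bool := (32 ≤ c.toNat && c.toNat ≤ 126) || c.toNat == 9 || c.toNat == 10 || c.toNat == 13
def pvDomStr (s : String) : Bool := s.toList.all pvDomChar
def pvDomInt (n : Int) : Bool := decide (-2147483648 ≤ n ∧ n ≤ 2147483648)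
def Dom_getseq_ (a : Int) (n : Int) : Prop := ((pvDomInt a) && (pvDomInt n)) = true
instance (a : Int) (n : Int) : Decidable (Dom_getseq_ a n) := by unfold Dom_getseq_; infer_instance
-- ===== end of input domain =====

-- B computes the phase-1 run length in closed form (hand-written integer square root) and the
-- remainder pairs by index arithmetic, instead of A's term-by-term scanning loops (alternative algorithm).


-- ===== PORT A =====
-- the while loop; fuel only makes it total (proved sufficient on Dom), the steps are A's
def getseqLoop (a : Int) : Nat → List Int × Int × Int → List Int × Int × Int
  | 0, st => st
  | fuel + 1, (seq, sum, n) =>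
      if sum ≤ a - n then getseqLoop a fuel (seq ++ [n], sum + n, n + 1) else (seq, sum, n)

def getseq_ (a : Int) (n : Int) : List Int × Int :=
  let st := getseqLoop a (4 * (a.natAbs + n.natAbs) + 8) ([], 0, n)
  let seq := st.1
  let sum := st.2.1
  let n1 := st.2.2
  if sum = a then (seq, n1)
  else
    let st2 := (PySem.List.pyRange 0 (a - sum) 1).foldl
      (fun (st : List Int × Int) _ => (st.1 ++ [-st.2, st.2 + 1], st.2 + 2)) (seq, n1)
    (st2.1, st2.2)

-- ===== PORT B =====
-- bitwise floor square root, as in Source B (`1 << k` is 2 ^ k.toNat; k ≥ 0 whenever it is used)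
def isqrtAux (x : Int) (k : Int) (r : Int) : Int :=
  if h : k < 0 then r
  else
    let c := r + 2 ^ k.toNat
    isqrtAux x (k - 1) (if c * c ≤ x then c else r)
termination_by (k + 1).toNat
decreasing_by simp_wf; omega

def isqrtB (x : Int) : Int := isqrtAux x 63 0

def getseq__alt (a : Int) (n : Int) : List Int × Int :=
  let m := if n > a then 0
           else PySem.Int.floordiv (isqrtB ((2 * n - 1) ^ 2 + 8 * a) - (2 * n + 1)) 2 + 1
  let seq := PySem.List.pyRange n (n + m) 1
  let s := m * n + PySem.Int.floordiv (m * (m - 1)) 2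
  let n1 := n + m
  if s = a then (seq, n1)
  else
    let r := a - s
    if 0 < r then
      (seq ++ (PySem.List.pyRange 0 r 1).flatMap (fun i => [-(n1 + 2 * i), n1 + 2 * i + 1]),
       n1 + 2 * r)
    else (seq, n1)

-- ===== PRECONDITION & SPEC =====
def Spec_getseq_ (a : Int) (n : Int) (out : List Int × Int) : Prop := out = getseq__alt a n
instance (a : Int) (n : Int) (out : List Int × Int) : Decidable (Spec_getseq_ a n out) := by unfold Spec_getseq_; infer_instance

-- ===== CLAIM (what is proved, stated in full; the proofs are below) =====
def Claim_equal_getseq_ : Prop := ∀ (a : Int) (n : Int), Dom_getseq_ a n → Spec_getseq_ a n (getseq_ a n)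

-- ===== LEMMAS AND PROOFS =====

-- partial sums of the run n0, n0+1, …
def psum (n0 : Int) : Nat → Int
  | 0 => 0
  | k + 1 => psum n0 k + (n0 + k)

-- the common normal form both programs are reduced to (mI = number of phase-1 steps)
def gcommon (a n mI : Int) : List Int × Int :=
  let seq := PySem.List.pyRange n (n + mI) 1
  let s := psum n mI.toNat
  if s = a then (seq, n + mI)
  else if 0 < a - s then
    (seq ++ (PySem.List.pyRange 0 (a - s) 1).flatMap
        (fun i => [-(n + mI + 2 * i), n + mI + 2 * i + 1]),
     n + mI + 2 * (a - s))
  else (seq, n + mI)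

theorem two_psum (n0 : Int) (k : Nat) :
    2 * psum n0 k = 2 * (k : Int) * n0 + (k : Int) * ((k : Int) - 1) := by
  induction k with
  | zero => simp [psum]
  | succ k ih =>
      simp only [psum]
      push_cast
      push_cast at ih
      ring_nf
      ring_nf at ih
      linarith

theorem isqrtAux_spec : ∀ (j : Nat) (x r : Int), 0 ≤ r → ((2 : Int) ^ j ∣ r) →
    r * r ≤ x → x < (r + 2 ^ j) * (r + 2 ^ j) →
    0 ≤ isqrtAux x ((j : Int) - 1) r ∧
      isqrtAux x ((j : Int) - 1) r * isqrtAux x ((j : Int) - 1) r ≤ x ∧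
      x < (isqrtAux x ((j : Int) - 1) r + 1) * (isqrtAux x ((j : Int) - 1) r + 1) := by
  intro j
  induction j with
  | zero =>
      intro x r hr _ h1 h2
      have hred : isqrtAux x (((0 : Nat) : Int) - 1) r = r := by
        rw [isqrtAux.eq_def]; norm_num
      rw [hred]
      exact ⟨hr, h1, by simpa using h2⟩
  | succ j ih =>
      intro x r hr hdvd h1 h2
      rw [isqrtAux.eq_def]
      have hk : ¬ ((j + 1 : Nat) : Int) - 1 < 0 := by push_cast; omega
      simp only [hk, dif_neg, not_false_iff]
      have ht : (((j + 1 : Nat) : Int) - 1).toNat = j := by omega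
      have hstep : ((j + 1 : Nat) : Int) - 1 - 1 = (j : Int) - 1 := by push_cast; ring
      rw [ht, hstep]
      set c := r + 2 ^ j with hc
      by_cases hcx : c * c ≤ x
      · simp only [hcx, if_true]
        refine ih x c (by positivity) ?_ hcx ?_
        · obtain ⟨t, htq⟩ := hdvd
          exact ⟨2 * t + 1, by rw [hc, htq]; ring⟩
        · have : c + 2 ^ j = r + 2 ^ (j + 1) := by rw [hc]; ring
          rw [this]; exact h2
      · simp only [hcx, if_false]
        exact ih x r hr (dvd_trans ⟨2, by ring⟩ hdvd) h1 (by simpa [hc] using hcx)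

theorem isqrtB_spec (x : Int) (h0 : 0 ≤ x) (h1 : x < 2 ^ 128) :
    0 ≤ isqrtB x ∧ isqrtB x * isqrtB x ≤ x ∧ x < (isqrtB x + 1) * (isqrtB x + 1) := by
  have h := isqrtAux_spec 64 x 0 le_rfl ⟨0, by ring⟩ (by simpa using h0)
    (by norm_num; exact h1)
  simpa [isqrtB, show ((64 : Nat) : Int) - 1 = 63 by norm_num] using h

-- the while loop runs exactly m steps and produces the run list
theorem loop_spec (a n0 : Int) (m : Nat)
    (hcont : ∀ k : Nat, k < m → psum n0 k ≤ a - (n0 + k))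
    (hstop : ¬ psum n0 m ≤ a - (n0 + m)) :
    ∀ (fuel : Nat) (j : Nat) (seq0 : List Int), j ≤ m → m - j ≤ fuel →
      getseqLoop a fuel (seq0, psum n0 j, n0 + j)
        = (seq0 ++ PySem.List.pyRange (n0 + j) (n0 + m) 1, psum n0 m, n0 + m) := by
  intro fuel
  induction fuel with
  | zero =>
      intro j seq0 hj hf
      have : j = m := by omega
      subst this
      simp [getseqLoop, PySem.List.pyRange_one_eq_nil le_rfl]
  | succ fuel ih =>
      intro j seq0 hj hf
      by_cases hjm : j = m
      · subst hjm
        simp [getseqLoop, hstop, PySem.List.pyRange_one_eq_nil le_rfl]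
      · have hjlt : j < m := by omega
        have hc := hcont j hjlt
        rw [getseqLoop]
        simp only [hc, if_true]
        have h1 : psum n0 j + (n0 + j) = psum n0 (j + 1) := by simp [psum]
        have h2 : n0 + (j : Int) + 1 = n0 + ((j + 1 : Nat) : Int) := by push_cast; ring
        rw [h1, h2, ih (j + 1) (seq0 ++ [n0 + j]) (by omega) (by omega)]
        have hlt : n0 + (j : Int) < n0 + (m : Int) := by
          have : (j : Int) < (m : Int) := by exact_mod_cast hjlt
          omega
        rw [PySem.List.pyRange_one_cons hlt]
        simp [h2]

-- the pair phase: A's stateful fold equals B's flatMap over indices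
theorem pair_spec (r : Nat) : ∀ (seq : List Int) (n1 : Int),
    (PySem.List.pyRange 0 (r : Int) 1).foldl
        (fun (st : List Int × Int) _ => (st.1 ++ [-st.2, st.2 + 1], st.2 + 2)) (seq, n1)
      = (seq ++ (PySem.List.pyRange 0 (r : Int) 1).flatMap
            (fun i => [-(n1 + 2 * i), n1 + 2 * i + 1]),
         n1 + 2 * r) := by
  induction r with
  | zero => intro seq n1; simp [PySem.List.pyRange_one_eq_nil le_rfl]
  | succ r ih =>
      intro seq n1
      have hsplit : PySem.List.pyRange 0 ((r + 1 : Nat) : Int) 1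
          = PySem.List.pyRange 0 (r : Int) 1 ++ [(r : Int)] := by
        have := PySem.List.pyRange_one_succ_right (a := 0) (b := (r : Int)) (by positivity)
        rw [show ((r + 1 : Nat) : Int) = (r : Int) + 1 by push_cast; ring]
        exact this
      rw [hsplit, List.foldl_append, ih, List.flatMap_append]
      simp only [List.foldl_cons, List.foldl_nil, List.flatMap_cons, List.flatMap_nil,
        Prod.mk.injEq, List.append_assoc, List.append_nil]
      exact ⟨trivial, by push_cast; ring⟩

-- B's closed-form partial sum equals psum
theorem sB_eq_psum (n0 mI : Int) (hm : 0 ≤ mI) :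
    mI * n0 + PySem.Int.floordiv (mI * (mI - 1)) 2 = psum n0 mI.toNat := by
  obtain ⟨t, ht⟩ : Even (mI * (mI - 1)) := by
    rcases Int.even_or_odd mI with h | h
    · exact h.mul_right _
    · exact (Odd.sub_odd h odd_one).mul_left _
  have hfd : PySem.Int.floordiv (mI * (mI - 1)) 2 = t := by
    rw [PySem.Int.floordiv_eq_ediv_of_pos (by norm_num)]
    omega
  have h2 := two_psum n0 mI.toNat
  have hc : ((mI.toNat : Nat) : Int) = mI := Int.toNat_of_nonneg hm
  rw [hc] at h2
  rw [hfd]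
  nlinarith [h2, ht]

-- B reduces to the common normal form
theorem getseqB_eq (a n mI : Int) (hm : 0 ≤ mI)
    (hmval : (if n > a then (0 : Int)
        else PySem.Int.floordiv (isqrtB ((2 * n - 1) ^ 2 + 8 * a) - (2 * n + 1)) 2 + 1) = mI) :
    getseq__alt a n = gcommon a n mI := by
  rw [getseq__alt, gcommon, hmval, sB_eq_psum n mI hm]

-- A reduces to the common normal form
theorem getseqA_eq (a n mI : Int) (hm : 0 ≤ mI)
    (hcont : ∀ k : Nat, k < mI.toNat → psum n k ≤ a - (n + k))
    (hstop : ¬ psum n mI.toNat ≤ a - (n + mI.toNat))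
    (hfuel : mI.toNat ≤ 4 * (a.natAbs + n.natAbs) + 8) :
    getseq_ a n = gcommon a n mI := by
  have hloop := loop_spec a n mI.toNat hcont hstop (4 * (a.natAbs + n.natAbs) + 8) 0 []
    (by omega) (by omega)
  have h0 : psum n 0 = 0 := rfl
  have h0' : n + ((0 : Nat) : Int) = n := by norm_num
  rw [h0, h0'] at hloop
  have hmc : ((mI.toNat : Nat) : Int) = mI := Int.toNat_of_nonneg hm
  rw [hmc] at hloop
  rw [getseq_, gcommon]
  simp only [hloop, List.nil_append]
  by_cases hsa : psum n mI.toNat = a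
  · simp [hsa]
  · simp only [hsa, if_false]
    set r := a - psum n mI.toNat with hr
    by_cases hrpos : 0 < r
    · have hc : ((r.toNat : Nat) : Int) = r := Int.toNat_of_nonneg (le_of_lt hrpos)
      have hp := pair_spec r.toNat (PySem.List.pyRange n (n + mI) 1) (n + mI)
      rw [hc] at hp
      simp only [if_pos hrpos, hp]
    · have hnil : PySem.List.pyRange 0 r 1 = [] :=
        PySem.List.pyRange_one_eq_nil (by omega)
      rw [hnil]
      simp [hrpos]

set_option maxHeartbeats 3000000 in
theorem getseq__spec_aux : ∀ (a n : Int), Dom_getseq_ a n →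
    getseq_ a n = getseq__alt a n := by
  intro a n hdom
  have hb : -2147483648 ≤ a ∧ a ≤ 2147483648 ∧ -2147483648 ≤ n ∧ n ≤ 2147483648 := by
    simp only [Dom_getseq_, pvDomInt, Bool.and_eq_true, decide_eq_true_eq] at hdom
    exact ⟨hdom.1.1, hdom.1.2, hdom.2.1, hdom.2.2⟩
  by_cases hna : a < n
  · -- the while loop does not run; m = 0 in B
    have hstop : ¬ psum n 0 ≤ a - (n + ((0 : Nat) : Int)) := by
      simp only [psum]; push_cast; omega
    rw [getseqA_eq a n 0 le_rfl (by intro k hk; omega)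
          (by simpa using hstop) (by simp),
        getseqB_eq a n 0 le_rfl (if_pos hna)]
  · -- n ≤ a : the closed form gives the exact loop count
    have hna' : n ≤ a := by omega
    set D := (2 * n - 1) ^ 2 + 8 * a with hD
    have hD0 : 0 ≤ D := by rw [hD]; nlinarith [sq_nonneg (2 * n + 1)]
    have hDlt : D < 2 ^ 128 := by
      have hn1 : -4294967297 ≤ 2 * n - 1 := by omega
      have hn2 : 2 * n - 1 ≤ 4294967297 := by omega
      have h1 : (2 * n - 1) ^ 2 ≤ 4294967297 ^ 2 := by nlinarith
      have h2 : (4294967297 : Int) ^ 2 + 8 * 2147483648 < 2 ^ 128 := by norm_num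
      rw [hD]
      nlinarith [hb.2.1]
    obtain ⟨hs0, hs1, hs2⟩ := isqrtB_spec D hD0 hDlt
    set s := isqrtB D with hsdef
    have hk0 : (2 * n + 1) * (2 * n + 1) ≤ D := by rw [hD]; nlinarith
    have habs : -s ≤ 2 * n + 1 ∧ 2 * n + 1 ≤ s := by
      constructor <;> nlinarith
    set q := PySem.Int.floordiv (s - (2 * n + 1)) 2 with hqdef
    have hq : 2 * q ≤ s - (2 * n + 1) ∧ s - (2 * n + 1) < 2 * q + 2 := by
      rw [hqdef, PySem.Int.floordiv_eq_ediv_of_pos (by norm_num)]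
      omega
    set mI := q + 1 with hmI
    have hm0 : 0 ≤ mI := by omega
    have hmc : ((mI.toNat : Nat) : Int) = mI := Int.toNat_of_nonneg hm0
    have hchar : ∀ k : Nat, psum n k ≤ a - (n + k) ↔
        (2 * (k : Int) + 2 * n + 1) * (2 * (k : Int) + 2 * n + 1) ≤ D := by
      intro k
      have h2p := two_psum n k
      rw [hD]
      constructor <;> intro h <;> nlinarith
    have hcont : ∀ k : Nat, k < mI.toNat → psum n k ≤ a - (n + k) := by
      intro k hk
      rw [hchar]
      have hkq : (k : Int) ≤ q := by omega
      have hxu : 2 * (k : Int) + 2 * n + 1 ≤ s := by omega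
      have hxl : -s ≤ 2 * (k : Int) + 2 * n + 1 := by
        have h := habs.1; omega
      have hsq : 0 ≤ (s - (2 * (k : Int) + 2 * n + 1)) * (s + (2 * (k : Int) + 2 * n + 1)) :=
        mul_nonneg (by linarith) (by linarith)
      nlinarith [hsq, hs1]
    have hstop : ¬ psum n mI.toNat ≤ a - (n + mI.toNat) := by
      rw [hchar, hmc]
      have hx : s + 1 ≤ 2 * mI + 2 * n + 1 := by omega
      intro h
      have hsq : (s + 1) * (s + 1) ≤ (2 * mI + 2 * n + 1) * (2 * mI + 2 * n + 1) :=
        mul_le_mul hx hx (by linarith) (by linarith)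
      linarith [hs2, h, hsq]
    have hL : s ≤ 2 * (n.natAbs : Int) + 1 + 4 * (a.natAbs : Int) := by
      have hN0 : (0 : Int) ≤ (n.natAbs : Int) := by omega
      have hA0 : (0 : Int) ≤ (a.natAbs : Int) := by omega
      have e0 : 0 ≤ (2 * (n.natAbs : Int) + 1 - (2 * n - 1)) * (2 * (n.natAbs : Int) + 1 + (2 * n - 1)) :=
        mul_nonneg (by omega) (by omega)
      have e1 : (2 * n - 1) ^ 2 ≤ (2 * (n.natAbs : Int) + 1) ^ 2 := by nlinarith [e0]
      have e2 : (2 * (n.natAbs : Int) + 1) ^ 2 + 8 * (a.natAbs : Int)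
          ≤ (2 * (n.natAbs : Int) + 1 + 4 * (a.natAbs : Int)) ^ 2 := by
        nlinarith [mul_nonneg hA0 hN0, mul_nonneg hA0 hA0]
      have h1 : D ≤ (2 * (n.natAbs : Int) + 1 + 4 * (a.natAbs : Int)) ^ 2 := by
        rw [hD]
        have : a ≤ (a.natAbs : Int) := by omega
        linarith [e1, e2]
      by_contra hcon
      have h2 : 2 * (n.natAbs : Int) + 1 + 4 * (a.natAbs : Int) + 1 ≤ s := by omega
      have h3 : (2 * (n.natAbs : Int) + 1 + 4 * (a.natAbs : Int) + 1)
            * (2 * (n.natAbs : Int) + 1 + 4 * (a.natAbs : Int) + 1) ≤ s * s :=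
        mul_le_mul h2 h2 (by omega) (by linarith)
      nlinarith [h3, hs1, h1]
    have hfuel : mI.toNat ≤ 4 * (a.natAbs + n.natAbs) + 8 := by omega
    have hA := getseqA_eq a n mI hm0 hcont hstop hfuel
    have hB := getseqB_eq a n mI hm0 (by rw [if_neg (by omega : ¬ n > a), ← hD, ← hsdef, ← hqdef, hmI])
    rw [hA, hB]

-- ===== VERDICT (by name: the statement is the Claim_ definition above) =====
theorem getseq__spec : Claim_equal_getseq_ := by
  intro a n hdom
  unfold Spec_getseq_
  exact getseq__spec_aux a n hdom
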